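-- pv_equiv track=rewrite | github.com/AKAMasterMind404/PythonFiles | Final_450_DSA/5_Move_all_the_negative_elements_to_one_side_of_the_array.py | moveNegatives
-- ===== SOURCE A (Python) =====
-- def moveNegatives(arr: list) -> list:
--     p ,n = list(), list()
--     for i in arr:
--         if i >= 0:
--             p.append(i)
--         else:
--             n.append(i)
--     return p + n
-- ===== SOURCE B (Python) =====
-- def moveNegatives(arr: list) -> list:
--     # one stable sort: non-negatives (key False) first, each group keeps its order
--     return sorted(arr, key=lambda x: x < 0)
-- ===== Notes on version B (the rewrite author's own statement) =====
-- stated objective: idiomatic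
-- what changed: Replaces the two-bucket append loop with a single stable sort on the boolean key x < 0, whose stability reproduces the exact within-group order.
import Mathlib
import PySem

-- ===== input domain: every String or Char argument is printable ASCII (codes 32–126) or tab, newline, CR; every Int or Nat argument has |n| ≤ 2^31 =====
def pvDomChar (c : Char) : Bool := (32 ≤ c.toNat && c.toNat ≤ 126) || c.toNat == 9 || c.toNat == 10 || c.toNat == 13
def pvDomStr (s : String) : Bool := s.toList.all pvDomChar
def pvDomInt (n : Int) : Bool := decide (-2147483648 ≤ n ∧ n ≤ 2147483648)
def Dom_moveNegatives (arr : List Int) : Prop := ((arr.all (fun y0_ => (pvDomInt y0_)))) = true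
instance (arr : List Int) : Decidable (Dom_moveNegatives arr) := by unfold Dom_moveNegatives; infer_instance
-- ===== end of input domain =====

-- B replaces A's two-bucket append loop with one stable sort on the key (x < 0) — more idiomatic, same result.


-- ===== PORT A =====
-- p, n = [], []; for i in arr: append to p if i >= 0 else to n; return p + n
def moveNegatives (arr : List Int) : List Int :=
  let pn := arr.foldl
    (fun (pn : List Int × List Int) i =>
      if i ≥ 0 then (pn.1 ++ [i], pn.2) else (pn.1, pn.2 ++ [i]))
    ([], [])
  pn.1 ++ pn.2

-- ===== PORT B =====
-- return sorted(arr, key=lambda x: x < 0)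
def moveNegatives_alt (arr : List Int) : List Int :=
  PySem.List.sorted arr (fun x => decide (x < 0)) false

-- ===== PRECONDITION & SPEC =====
def Spec_moveNegatives (arr : List Int) (out : List Int) : Prop := out = moveNegatives_alt arr
instance (arr : List Int) (out : List Int) : Decidable (Spec_moveNegatives arr out) := by unfold Spec_moveNegatives; infer_instance

-- ===== CLAIM (what is proved, stated in full; the proofs are below) =====
def Claim_equal_moveNegatives : Prop := ∀ (arr : List Int), Dom_moveNegatives arr → Spec_moveNegatives arr (moveNegatives arr)

-- ===== LEMMAS AND PROOFS =====

-- A's loop, characterised: it builds the filters of the two sign classes.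
theorem moveNegatives_foldl_inv (xs : List Int) (p n : List Int) :
    xs.foldl
      (fun (pn : List Int × List Int) i =>
        if i ≥ 0 then (pn.1 ++ [i], pn.2) else (pn.1, pn.2 ++ [i]))
      (p, n)
    = (p ++ xs.filter (fun x => decide (0 ≤ x)), n ++ xs.filter (fun x => decide (x < 0))) := by
  induction xs generalizing p n with
  | nil => simp
  | cons x xs ih =>
    by_cases hx : 0 ≤ x
    · simp only [List.foldl_cons, List.filter_cons]
      rw [if_pos hx, ih]
      simp [hx, not_lt.mpr hx]
    · simp only [List.foldl_cons, List.filter_cons]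
      rw [if_neg hx, ih]
      simp [hx, lt_of_not_ge hx]

theorem moveNegatives_eq_filters (arr : List Int) :
    moveNegatives arr
      = arr.filter (fun x => decide (0 ≤ x)) ++ arr.filter (fun x => decide (x < 0)) := by
  unfold moveNegatives
  rw [moveNegatives_foldl_inv]
  simp

-- inserting a non-negative element goes right between the non-negative and the negative block
theorem insertBy_middle (x : Int) (p n : List Int)
    (hx : ¬ x < 0) (hp : ∀ y ∈ p, ¬ y < 0) (hn : ∀ y ∈ n, y < 0) :
    PySem.List.insertBy
      (fun a b => decide ((decide (a < 0) : Bool) < (decide (b < 0) : Bool))) x (p ++ n)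
    = p ++ x :: n := by
  induction p with
  | nil =>
    cases n with
    | nil => simp [PySem.List.insertBy]
    | cons y ys =>
      have hy : y < 0 := hn y (by simp)
      simp [PySem.List.insertBy, hx, hy, Bool.lt_iff]
  | cons a p ih =>
    have ha : ¬ a < 0 := hp a (by simp)
    have hstep : (decide ((decide (x < 0) : Bool) < (decide (a < 0) : Bool))) = false := by
      simp [hx, ha]
    simp only [List.cons_append, PySem.List.insertBy, hstep]
    simp only [Bool.false_eq_true, if_false]
    rw [ih (fun y hy => hp y (by simp [hy]))]

-- B's sort, characterised through its foldl/insertBy form: same two blocks.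
theorem moveNegatives_sort_inv (xs : List Int) (p n : List Int)
    (hp : ∀ y ∈ p, ¬ y < 0) (hn : ∀ y ∈ n, y < 0) :
    xs.foldl
      (fun acc x =>
        PySem.List.insertBy
          (fun a b => decide ((decide (a < 0) : Bool) < (decide (b < 0) : Bool))) x acc)
      (p ++ n)
    = (p ++ xs.filter (fun x => decide (0 ≤ x))) ++ (n ++ xs.filter (fun x => decide (x < 0))) := by
  induction xs generalizing p n with
  | nil => simp
  | cons x xs ih =>
    by_cases hx : x < 0
    · have hins : PySem.List.insertBy
          (fun a b => decide ((decide (a < 0) : Bool) < (decide (b < 0) : Bool))) x (p ++ n)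
          = (p ++ n) ++ [x] := by
        apply PySem.List.insertBy_of_forall_not_before
        intro y _
        simp [hx, Bool.lt_iff]
      simp only [List.foldl_cons, hins, List.append_assoc]
      rw [ih p (n ++ [x]) hp (by intro y hy; rcases List.mem_append.mp hy with h | h
                                 · exact hn y h
                                 · simp at h; omega)]
      simp [hx, not_le.mpr hx]
    · simp only [List.foldl_cons, insertBy_middle x p n hx hp hn]
      have : p ++ x :: n = (p ++ [x]) ++ n := by simp
      rw [this, ih (p ++ [x]) n
            (by intro y hy; rcases List.mem_append.mp hy with h | h
                · exact hp y h
                · simp at h; omega) hn]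
      simp [hx, not_lt.mp hx]

theorem moveNegatives_alt_eq_filters (arr : List Int) :
    moveNegatives_alt arr
      = arr.filter (fun x => decide (0 ≤ x)) ++ arr.filter (fun x => decide (x < 0)) := by
  unfold moveNegatives_alt
  rw [PySem.List.sorted_eq_foldl_insertBy]
  have := moveNegatives_sort_inv arr [] [] (by simp) (by simp)
  simpa using this

-- ===== VERDICT (by name: the statement is the Claim_ definition above) =====
theorem moveNegatives_spec : Claim_equal_moveNegatives := by
  intro arr _
  unfold Spec_moveNegatives
  rw [moveNegatives_eq_filters, moveNegatives_alt_eq_filters]
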